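-- pv_equiv track=rewrite | github.com/GIScience/openelevationservice | openelevationservice/server/sources/srtm.py | srtm_y_value
-- ===== SOURCE A (Python) =====
-- def srtm_y_value(y_min, y_max):
--     """Define SRTM y value download name."""
--
--     y_value_list = []
--
--     lon_min = 55
--     lon_max = 60
--     y_srtm_value = 1
--
--     for i in range(0, 120):
--
--         if lon_max > y_min >= lon_min:
--             if y_min <= y_max:
--                 y_value_list.append(y_srtm_value)
--                 y_min += 5
--                 if y_min > 60:
--                     return y_value_list
--             else:
--                 return y_value_list
--         else:
--             lon_min -= 5
--             lon_max -= 5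
--             y_srtm_value += 1
--
--     return y_value_list
-- ===== SOURCE B (Python) =====
-- def srtm_y_value(y_min, y_max):
--     """Define SRTM y value download name."""
--     v = (64 - y_min) // 5
--     if 1 <= v <= 120 and y_min <= y_max:
--         return [v]
--     return []
-- ===== Notes on version B (the rewrite author's own statement) =====
-- stated objective: simpler
-- what changed: Replaced the 120-iteration descending-band loop with the closed-form band index v = (64 - y_min)//5 and a single range/order check.
import Mathlib
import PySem

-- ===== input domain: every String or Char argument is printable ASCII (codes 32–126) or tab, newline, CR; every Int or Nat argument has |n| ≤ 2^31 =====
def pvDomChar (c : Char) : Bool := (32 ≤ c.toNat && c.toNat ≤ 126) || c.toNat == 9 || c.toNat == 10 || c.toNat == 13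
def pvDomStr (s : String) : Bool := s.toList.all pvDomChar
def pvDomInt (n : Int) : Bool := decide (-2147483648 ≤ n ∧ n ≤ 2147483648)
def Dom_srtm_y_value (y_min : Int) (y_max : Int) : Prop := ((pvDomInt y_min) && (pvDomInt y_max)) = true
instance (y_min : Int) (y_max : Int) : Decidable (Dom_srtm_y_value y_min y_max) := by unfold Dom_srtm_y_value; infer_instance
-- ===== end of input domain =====

-- B replaces A's 120-step descending-band loop with the closed-form band index (simpler, O(1)).

-- ===== PORT A =====
-- literal port of A's for-loop: state (y_min, lon_min, lon_max, y_srtm_value, y_value_list),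
-- fuel = the remaining iterations of `range(0, 120)`; early `return`s become returning the list.
def srtmLoopA : Nat → Int → Int → Int → Int → Int → List Int → List Int
  | 0, _, _, _, _, _, acc => acc
  | n + 1, y_min, y_max, lon_min, lon_max, v, acc =>
    if lon_max > y_min ∧ y_min ≥ lon_min then
      if y_min ≤ y_max then
        let acc' := acc ++ [v]
        let y_min' := y_min + 5
        if y_min' > 60 then acc'
        else srtmLoopA n y_min' y_max lon_min lon_max v acc'
      else acc
    else srtmLoopA n y_min y_max (lon_min - 5) (lon_max - 5) (v + 1) acc

def srtm_y_value (y_min : Int) (y_max : Int) : List Int :=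
  srtmLoopA 120 y_min y_max 55 60 1 []

-- ===== PORT B =====
def srtm_y_value_alt (y_min : Int) (y_max : Int) : List Int :=
  let v := PySem.Int.floordiv (64 - y_min) 5
  if 1 ≤ v ∧ v ≤ 120 ∧ y_min ≤ y_max then [v] else []

-- ===== PRECONDITION & SPEC =====
def Spec_srtm_y_value (y_min : Int) (y_max : Int) (out : List Int) : Prop := out = srtm_y_value_alt y_min y_max
instance (y_min : Int) (y_max : Int) (out : List Int) : Decidable (Spec_srtm_y_value y_min y_max out) := by unfold Spec_srtm_y_value; infer_instance

-- ===== CLAIM (what is proved, stated in full; the proofs are below) =====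
def Claim_equal_srtm_y_value : Prop := ∀ (y_min : Int) (y_max : Int), Dom_srtm_y_value y_min y_max → Spec_srtm_y_value y_min y_max (srtm_y_value y_min y_max)

-- ===== LEMMAS AND PROOFS =====

-- once y_min has passed lon_max it never matches again (bands only descend), so the loop returns acc
theorem srtmLoopA_stuck (n : Nat) (y_min y_max lon_min lon_max v : Int) (acc : List Int)
    (h : lon_max ≤ y_min) :
    srtmLoopA n y_min y_max lon_min lon_max v acc = acc := by
  induction n generalizing lon_min lon_max v with
  | zero => rfl
  | succ n ih =>
    simp only [srtmLoopA]
    rw [if_neg (by omega)]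
    exact ih _ _ _ (by omega)

-- invariant characterisation: at band v with bounds (60-5v, 65-5v) and empty acc,
-- the loop returns [k] iff v ≤ k < v+n and y_min ≤ y_max, where k is the band index of y_min
theorem srtmLoopA_char (n : Nat) (y_min y_max v : Int) :
    srtmLoopA n y_min y_max (60 - 5 * v) (65 - 5 * v) v [] =
      (if v ≤ (64 - y_min) / 5 ∧ (64 - y_min) / 5 < v + n ∧ y_min ≤ y_max
       then [(64 - y_min) / 5] else []) := by
  induction n generalizing v with
  | zero =>
    simp only [srtmLoopA]
    rw [if_neg (by omega)]
  | succ n ih =>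
    simp only [srtmLoopA]
    by_cases hm : 65 - 5 * v > y_min ∧ y_min ≥ 60 - 5 * v
    · have hk : (64 - y_min) / 5 = v := by omega
      rw [if_pos hm]
      by_cases hle : y_min ≤ y_max
      · rw [if_pos hle]
        simp only [List.nil_append]
        by_cases h60 : y_min + 5 > 60
        · rw [if_pos h60, if_pos (by omega), hk]
        · rw [if_neg h60, srtmLoopA_stuck n _ _ _ _ _ _ (by omega),
            if_pos (by omega), hk]
      · rw [if_neg hle, if_neg (by omega)]
    · rw [if_neg hm]
      have h1 : 60 - 5 * v - 5 = 60 - 5 * (v + 1) := by ring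
      have h2 : 65 - 5 * v - 5 = 65 - 5 * (v + 1) := by ring
      rw [h1, h2, ih (v + 1)]
      have hk : (64 - y_min) / 5 ≠ v := by omega
      by_cases hc : v + 1 ≤ (64 - y_min) / 5 ∧ (64 - y_min) / 5 < v + 1 + n ∧ y_min ≤ y_max
      · rw [if_pos hc, if_pos (by omega)]
      · rw [if_neg hc, if_neg (by omega)]

-- ===== VERDICT (by name: the statement is the Claim_ definition above) =====
theorem srtm_y_value_spec : Claim_equal_srtm_y_value := by
  intro y_min y_max _
  show srtm_y_value y_min y_max = srtm_y_value_alt y_min y_max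
  have hc120 := srtmLoopA_char 120 y_min y_max 1
  norm_num at hc120
  rw [srtm_y_value, hc120]
  rw [srtm_y_value_alt, PySem.Int.floordiv_eq_ediv_of_pos (by norm_num)]
  by_cases hc : 1 ≤ (64 - y_min) / 5 ∧ (64 - y_min) / 5 ≤ 120 ∧ y_min ≤ y_max
  · rw [if_pos (by omega), if_pos hc]
  · rw [if_neg (by omega), if_neg hc]
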